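-- pv_equiv track=rewrite | github.com/seret1234-dot/weiss-chess-training | bn_manual_sets/bn positions_24-3-2026/bn2/4/reorder_positions_8_to_9_white_two_piece_change_v3.py | transition_stats
-- ===== SOURCE A (Python) =====
-- from typing import List, Dict, Optional
--
-- def parse_fen_piece_squares(fen: str) -> Dict[str, str]:
--     parts = fen.split()
--     board = parts[0]
--     ranks = board.split("/")
--     out = {}
--
--     for r_index, rank in enumerate(ranks):
--         file_idx = 0
--         for ch in rank:
--             if ch.isdigit():
--                 file_idx += int(ch)
--             else:
--                 sq = f"{'abcdefgh'[file_idx]}{8 - r_index}"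
--                 out[ch] = sq
--                 file_idx += 1
--     return out
--
-- def get_white_squares(pos: dict) -> Dict[str, str]:
--     wk = pos.get("white_king")
--     wn = pos.get("white_knight")
--     wb = pos.get("white_bishop")
--
--     if wk and wn and wb:
--         return {"K": wk, "N": wn, "B": wb}
--
--     fen = pos.get("fen")
--     if not fen:
--         return {"K": "?", "N": "?", "B": "?"}
--
--     mp = parse_fen_piece_squares(fen)
--     return {
--         "K": mp.get("K", "?"),
--         "N": mp.get("N", "?"),
--         "B": mp.get("B", "?"),
--     }
--
-- def change_signature(pos_a: dict, pos_b: dict) -> str: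
--     a = get_white_squares(pos_a)
--     b = get_white_squares(pos_b)
--
--     changed = []
--     if a["B"] != b["B"]:
--         changed.append("B")
--     if a["K"] != b["K"]:
--         changed.append("K")
--     if a["N"] != b["N"]:
--         changed.append("N")
--
--     return "".join(changed)
--
-- def transition_stats(data: List[dict]) -> Dict[str, int]:
--     if len(data) <= 1:
--         return {
--             "transitions": 0,
--             "good_two_plus": 0,
--             "bad_under_two": 0,
--             "repeat_sig": 0,
--             "three_changed": 0,
--         }
--
--     good_two_plus = 0
--     bad_under_two = 0
--     repeat_sig = 0
--     three_changed = 0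
--     prev_sig = None
--
--     for i in range(len(data) - 1):
--         sig = change_signature(data[i], data[i + 1])
--
--         if len(sig) >= 2:
--             good_two_plus += 1
--         else:
--             bad_under_two += 1
--
--         if len(sig) == 3:
--             three_changed += 1
--
--         if prev_sig is not None and sig == prev_sig:
--             repeat_sig += 1
--
--         prev_sig = sig
--
--     return {
--         "transitions": len(data) - 1,
--         "good_two_plus": good_two_plus,
--         "bad_under_two": bad_under_two,
--         "repeat_sig": repeat_sig,
--         "three_changed": three_changed,
--     }
-- ===== SOURCE B (Python) =====
-- # B: histogram + run-length counting. Parse each position once, build the list of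
-- # consecutive-pair change signatures, then derive the counters algebraically: a
-- # frequency histogram of signatures gives good_two_plus (sum of counts of keys with
-- # len>=2) and three_changed (freq of 'BKN'); bad_under_two is the complement
-- # transitions - good_two_plus; repeat_sig is transitions minus the number of runs
-- # (each run of r equal signatures contributes r-1 repeats).
--
-- def _piece_squares(fen):
--     mp = {}
--     for r, rank in enumerate(fen.split()[0].split("/")):
--         f = 0
--         for ch in rank:
--             if ch.isdigit():
--                 f += int(ch)
--             else:
--                 mp[ch] = "abcdefgh"[f] + str(8 - r)
--                 f += 1
--     return mp
--
--
-- def _white_squares(pos):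
--     vals = [pos.get(k) for k in ("white_king", "white_knight", "white_bishop")]
--     if all(vals):
--         return dict(zip("KNB", vals))
--     fen = pos.get("fen")
--     if not fen:
--         return dict.fromkeys("KNB", "?")
--     mp = _piece_squares(fen)
--     return {p: mp.get(p, "?") for p in "KNB"}
--
--
-- def transition_stats(data):
--     if len(data) <= 1:
--         return {
--             "transitions": 0,
--             "good_two_plus": 0,
--             "bad_under_two": 0,
--             "repeat_sig": 0,
--             "three_changed": 0,
--         }
--     squares = [_white_squares(pos) for pos in data]
--     sigs = ["".join(p for p in "BKN" if a[p] != b[p])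
--             for a, b in zip(squares, squares[1:])]
--     freq = {}
--     for s in sigs:
--         freq[s] = freq.get(s, 0) + 1
--     trans = len(data) - 1
--     good = sum(c for k, c in freq.items() if len(k) >= 2)
--     runs = 1 + sum(1 for s, t in zip(sigs, sigs[1:]) if s != t)
--     return {
--         "transitions": trans,
--         "good_two_plus": good,
--         "bad_under_two": trans - good,
--         "repeat_sig": trans - runs,
--         "three_changed": freq.get("BKN", 0),
--     }
-- ===== Notes on version B (the rewrite author's own statement) =====
-- stated objective: alternative
-- what changed: B replaces A's single stateful scan (four running counters plus a prev_sig register) by histogram/run-length counting: it builds the signature list once, then gets good_two_plus by summing a frequency histogram over keys of length>=2, three_changed as the histogram entry for 'BKN', bad_under_two as the complement transitions-good, and repeat_sig as transitions minus the number of runs of equal signatures.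
import Mathlib
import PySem

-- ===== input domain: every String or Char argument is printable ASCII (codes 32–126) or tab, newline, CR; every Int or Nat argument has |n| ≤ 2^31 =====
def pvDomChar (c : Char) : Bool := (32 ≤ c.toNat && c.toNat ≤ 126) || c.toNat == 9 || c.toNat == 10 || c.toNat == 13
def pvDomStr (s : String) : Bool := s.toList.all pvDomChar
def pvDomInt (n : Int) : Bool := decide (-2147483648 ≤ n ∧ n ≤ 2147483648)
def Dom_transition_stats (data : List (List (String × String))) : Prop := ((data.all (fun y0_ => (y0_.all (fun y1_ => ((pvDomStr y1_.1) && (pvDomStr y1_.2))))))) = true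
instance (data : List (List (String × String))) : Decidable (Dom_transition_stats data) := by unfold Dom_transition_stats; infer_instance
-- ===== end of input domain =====

-- B re-counts by histogram/run-length instead of A's stateful scan: parse each position once, build the
-- signature list, then good_two_plus = histogram sum over keys of len>=2, three_changed = histogram of "BKN",
-- bad_under_two = transitions - good, repeat_sig = transitions - number of runs (alternative decomposition).

-- truthiness of an Optional[str]: 'if s:' — not None and not ""
def pvTruthy (o : Option String) : Bool := decide (o.getD "" ≠ "")

-- ===== PORT A =====
def parseFenA (fen : String) : PySem.Dict String String :=
  let parts := PySem.Str.split₀ fen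
  let board := parts.getD 0 ""      -- parts[0]; IndexError (parts = []) is excluded by Pre_
  let ranks := (PySem.Str.split? board "/").getD []
  ((PySem.List.enumerate ranks 0).foldl
    (fun (out : PySem.Dict String String) ri_rank =>
      (ri_rank.2.toList.foldl
        (fun (st : PySem.Dict String String × Int) ch =>
          if PySem.Chars.isdigit ch then
            (st.1, st.2 + (PySem.Int.ofChars? [ch]).getD 0)
          else
            -- sq = 'abcdefgh'[file_idx] + str(8 - r_index); IndexError (file_idx > 7) is excluded by Pre_
            let sq := String.ofList (PySem.List.pyGetD "abcdefgh".toList st.2 ' ' :: PySem.Int.toChars (8 - ri_rank.1))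
            (st.1.insert (String.ofList [ch]) sq, st.2 + 1))
        (out, 0)).1)
    PySem.Dict.empty)

def whiteSquaresA (pos : List (String × String)) : PySem.Dict String String :=
  let d := PySem.Dict.mk pos
  let wk := d.get? "white_king"
  let wn := d.get? "white_knight"
  let wb := d.get? "white_bishop"
  if pvTruthy wk && pvTruthy wn && pvTruthy wb then
    ((PySem.Dict.empty.insert "K" (wk.getD "")).insert "N" (wn.getD "")).insert "B" (wb.getD "")
  else
    let fen := d.get? "fen"
    if !pvTruthy fen then
      ((PySem.Dict.empty.insert "K" "?").insert "N" "?").insert "B" "?"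
    else
      let mp := parseFenA (fen.getD "")
      ((PySem.Dict.empty.insert "K" (mp.getD "K" "?")).insert "N" (mp.getD "N" "?")).insert "B" (mp.getD "B" "?")

def changeSigA (pa pb : List (String × String)) : String :=
  let a := whiteSquaresA pa
  let b := whiteSquaresA pb
  let changed : List String := []
  let changed := if a.getD "B" "" ≠ b.getD "B" "" then changed ++ ["B"] else changed
  let changed := if a.getD "K" "" ≠ b.getD "K" "" then changed ++ ["K"] else changed
  let changed := if a.getD "N" "" ≠ b.getD "N" "" then changed ++ ["N"] else changed
  PySem.Str.join "" changed

def transition_stats (data : List (List (String × String))) : List (String × Int) :=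
  if (data.length : Int) ≤ 1 then
    [("transitions", 0), ("good_two_plus", 0), ("bad_under_two", 0), ("repeat_sig", 0), ("three_changed", 0)]
  else
    let st := (PySem.List.pyRange 0 ((data.length : Int) - 1) 1).foldl
      (fun (st : Int × Int × Int × Int × Option String) i =>
        let sig := changeSigA (PySem.List.pyGetD data i []) (PySem.List.pyGetD data (i + 1) [])
        let gb : Int × Int := if 2 ≤ PySem.Str.len sig then (st.1 + 1, st.2.1) else (st.1, st.2.1 + 1)
        let th : Int := if PySem.Str.len sig = 3 then st.2.2.2.1 + 1 else st.2.2.2.1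
        let rp : Int :=
          match st.2.2.2.2 with
          | some p => if sig = p then st.2.2.1 + 1 else st.2.2.1
          | none => st.2.2.1
        (gb.1, gb.2, rp, th, some sig))
      (0, 0, 0, 0, (none : Option String))
    [("transitions", (data.length : Int) - 1),
     ("good_two_plus", st.1), ("bad_under_two", st.2.1),
     ("repeat_sig", st.2.2.1), ("three_changed", st.2.2.2.1)]

-- ===== PORT B =====
def parseFenB (fen : String) : PySem.Dict String String :=
  let parts := PySem.Str.split₀ fen
  let board := parts.getD 0 ""      -- fen.split()[0]; IndexError excluded by Pre_
  let ranks := (PySem.Str.split? board "/").getD []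
  ((PySem.List.enumerate ranks 0).foldl
    (fun (mp : PySem.Dict String String) r_rank =>
      (r_rank.2.toList.foldl
        (fun (st : PySem.Dict String String × Int) ch =>
          if PySem.Chars.isdigit ch then
            (st.1, st.2 + (PySem.Int.ofChars? [ch]).getD 0)
          else
            let sq := String.ofList (PySem.List.pyGetD "abcdefgh".toList st.2 ' ' :: PySem.Int.toChars (8 - r_rank.1))
            (st.1.insert (String.ofList [ch]) sq, st.2 + 1))
        (mp, 0)).1)
    PySem.Dict.empty)

def whiteSquaresB (pos : List (String × String)) : PySem.Dict String String :=
  let d := PySem.Dict.mk pos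
  let vals := ["white_king", "white_knight", "white_bishop"].map (fun k => d.get? k)
  if vals.all pvTruthy then
    PySem.Dict.ofList (List.zip ["K", "N", "B"] (vals.map (fun v => v.getD "")))
  else
    let fen := d.get? "fen"
    if !pvTruthy fen then
      PySem.Dict.ofList (["K", "N", "B"].map (fun p => (p, "?")))
    else
      let mp := parseFenB (fen.getD "")
      PySem.Dict.ofList (["K", "N", "B"].map (fun p => (p, mp.getD p "?")))

def changeSigB (a b : PySem.Dict String String) : String :=
  PySem.Str.join "" (["B", "K", "N"].filter (fun p => a.getD p "" ≠ b.getD p ""))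

def transition_stats_alt (data : List (List (String × String))) : List (String × Int) :=
  if (data.length : Int) ≤ 1 then
    [("transitions", 0), ("good_two_plus", 0), ("bad_under_two", 0), ("repeat_sig", 0), ("three_changed", 0)]
  else
    let squares := data.map whiteSquaresB
    let sigs := (squares.zip (PySem.List.slice squares (some 1) none)).map (fun ab => changeSigB ab.1 ab.2)
    let freq := sigs.foldl (fun (d : PySem.Dict String Int) s => d.insert s (d.getD s 0 + 1)) PySem.Dict.empty
    let trans : Int := (data.length : Int) - 1
    let good : Int := ((freq.items.filter (fun kv => decide (2 ≤ PySem.Str.len kv.1))).map (·.2)).sum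
    let runs : Int := 1 + ((sigs.zip (PySem.List.slice sigs (some 1) none)).countP (fun st => st.1 != st.2) : Int)
    [("transitions", trans),
     ("good_two_plus", good), ("bad_under_two", trans - good),
     ("repeat_sig", trans - runs), ("three_changed", freq.getD "BKN" 0)]

-- ===== PRECONDITION & SPEC =====
-- Pre_ excludes exactly the inputs on which A raises IndexError while parsing a fen: a truthy fen that is
-- all whitespace (fen.split()[0] fails) or whose board places a piece character at file index > 7.
def pvWeight (cs : List Char) : Int :=
  (cs.map (fun c => if PySem.Chars.isdigit c then (PySem.Int.ofChars? [c]).getD 0 else 1)).sum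

def pvRankSafe (cs : List Char) : Bool :=
  (List.range cs.length).all (fun j => PySem.Chars.isdigit (cs.getD j ' ') || decide (pvWeight (cs.take j) ≤ 7))

def pvFenSafe (s : String) : Bool :=
  match PySem.Str.split₀ s with
  | [] => false
  | board :: _ => ((PySem.Str.split? board "/").getD []).all (fun r => pvRankSafe r.toList)

def pvPosSafe (pos : List (String × String)) : Bool :=
  let d := PySem.Dict.mk pos
  (pvTruthy (d.get? "white_king") && pvTruthy (d.get? "white_knight") && pvTruthy (d.get? "white_bishop"))
    || !pvTruthy (d.get? "fen")
    || pvFenSafe ((d.get? "fen").getD "")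

def Pre_transition_stats (data : List (List (String × String))) : Prop :=
  1 < data.length → ∀ pos ∈ data, pvPosSafe pos = true

instance (data : List (List (String × String))) : Decidable (Pre_transition_stats data) := by
  unfold Pre_transition_stats; infer_instance

def pvWitness_transition_stats : (List (List (String × String))) :=
  [[("white_king", "a1"), ("white_knight", "b1"), ("white_bishop", "c1")],
   [("fen", "8/8/8/8/8/8/8/KNB5 w - - 0 1")]]

def Spec_transition_stats (data : List (List (String × String))) (out : List (String × Int)) : Prop := out = transition_stats_alt data
instance (data : List (List (String × String))) (out : List (String × Int)) : Decidable (Spec_transition_stats data out) := by unfold Spec_transition_stats; infer_instance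

-- ===== CLAIM (what is proved, stated in full; the proofs are below) =====
def Claim_equal_transition_stats : Prop := ∀ (data : List (List (String × String))), Dom_transition_stats data → Pre_transition_stats data → Spec_transition_stats data (transition_stats data)

-- ===== LEMMAS AND PROOFS =====

theorem parseFen_eq : parseFenB = parseFenA := rfl

theorem ws_eq (pos : List (String × String)) : whiteSquaresB pos = whiteSquaresA pos := by
  unfold whiteSquaresB whiteSquaresA
  rw [parseFen_eq]
  simp only [List.map_cons, List.map_nil, List.all_cons, List.all_nil, Bool.and_true,
    List.zip_cons_cons, List.zip_nil_right]
  by_cases h1 : pvTruthy ((PySem.Dict.mk pos).get? "white_king") <;>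
  by_cases h2 : pvTruthy ((PySem.Dict.mk pos).get? "white_knight") <;>
  by_cases h3 : pvTruthy ((PySem.Dict.mk pos).get? "white_bishop") <;>
  by_cases h4 : pvTruthy ((PySem.Dict.mk pos).get? "fen") <;>
    simp only [h1, h2, h3, h4, Bool.and_false, Bool.and_true, Bool.not_true, Bool.not_false,
      if_true] <;>
    simp [PySem.Dict.ofList, PySem.Dict.update]

theorem sig_eq (pa pb : List (String × String)) :
    changeSigB (whiteSquaresA pa) (whiteSquaresA pb) = changeSigA pa pb := by
  unfold changeSigB changeSigA
  generalize whiteSquaresA pa = a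
  generalize whiteSquaresA pb = b
  by_cases hB : a.getD "B" "" ≠ b.getD "B" "" <;>
  by_cases hK : a.getD "K" "" ≠ b.getD "K" "" <;>
  by_cases hN : a.getD "N" "" ≠ b.getD "N" "" <;>
    simp [hB, hK, hN]

-- A's loop body as a step function on the 5-tuple state (identical shape to the port's lambda)
def pvStep (st : Int × Int × Int × Int × Option String) (sig : String) :
    Int × Int × Int × Int × Option String :=
  let gb : Int × Int := if 2 ≤ PySem.Str.len sig then (st.1 + 1, st.2.1) else (st.1, st.2.1 + 1)
  let th : Int := if PySem.Str.len sig = 3 then st.2.2.2.1 + 1 else st.2.2.2.1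
  let rp : Int :=
    match st.2.2.2.2 with
    | some p => if sig = p then st.2.2.1 + 1 else st.2.2.1
    | none => st.2.2.1
  (gb.1, gb.2, rp, th, some sig)

theorem pvStep_eq (g b r t : Int) (prev : Option String) (s : String) :
    pvStep (g, b, r, t, prev) s =
      (g + (if 2 ≤ PySem.Str.len s then 1 else 0),
       b + (if PySem.Str.len s < 2 then 1 else 0),
       r + (match prev with | some p => if s = p then 1 else 0 | none => 0),
       t + (if PySem.Str.len s = 3 then 1 else 0),
       some s) := by
  unfold pvStep
  cases prev <;> split_ifs <;> simp_all <;>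
    first
    | omega
    | (split_ifs <;> simp_all)

theorem pvLoop_some (sigs : List String) :
    ∀ (g b r t : Int) (p : String),
      sigs.foldl pvStep (g, b, r, t, some p) =
        (g + (sigs.countP (fun s => decide (2 ≤ PySem.Str.len s)) : Int),
         b + (sigs.countP (fun s => decide (PySem.Str.len s < 2)) : Int),
         r + (((p :: sigs).zip sigs).countP (fun q => q.1 == q.2) : Int),
         t + (sigs.countP (fun s => decide (PySem.Str.len s = 3)) : Int),
         some (sigs.getLastD p)) := by
  induction sigs with
  | nil => intro g b r t p; simp
  | cons s ss ih =>
    intro g b r t p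
    rw [List.foldl_cons, pvStep_eq, ih]
    simp only [List.countP_cons, List.zip_cons_cons, List.getLastD_cons]
    refine Prod.ext ?_ (Prod.ext ?_ (Prod.ext ?_ (Prod.ext ?_ rfl))) <;>
      simp <;> (try split_ifs) <;> (try simp_all [eq_comm]) <;> omega

theorem pvLoop_none (sigs : List String) :
    sigs.foldl pvStep (0, 0, 0, 0, (none : Option String)) =
      ((sigs.countP (fun s => decide (2 ≤ PySem.Str.len s)) : Int),
       (sigs.countP (fun s => decide (PySem.Str.len s < 2)) : Int),
       ((sigs.zip sigs.tail).countP (fun q => q.1 == q.2) : Int),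
       (sigs.countP (fun s => decide (PySem.Str.len s = 3)) : Int),
       (match sigs with | [] => (none : Option String) | s :: ss => some (ss.getLastD s))) := by
  cases sigs with
  | nil => simp
  | cons s ss =>
    rw [List.foldl_cons, pvStep_eq, pvLoop_some]
    simp only [List.countP_cons, List.tail_cons]
    refine Prod.ext ?_ (Prod.ext ?_ (Prod.ext ?_ (Prod.ext ?_ rfl))) <;>
      simp <;> (try split_ifs) <;> (try simp_all [eq_comm]) <;> omega

-- signatures take one of eight literal values
theorem sig_mem (pa pb : List (String × String)) :
    changeSigA pa pb ∈ (["", "B", "K", "N", "BK", "BN", "KN", "BKN"] : List String) := by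
  simp only [changeSigA]
  split_ifs <;> decide

theorem sig_len3_iff (pa pb : List (String × String)) :
    (decide (PySem.Str.len (changeSigA pa pb) = 3)) = (changeSigA pa pb == "BKN") := by
  have h := sig_mem pa pb
  generalize changeSigA pa pb = x at h ⊢
  fin_cases h <;> decide

-- A's index loop reads exactly the consecutive pairs of data
theorem map_range_eq (data : List (List (String × String))) (hd : data ≠ []) :
    (PySem.List.pyRange 0 ((data.length : Int) - 1) 1).map
        (fun i => changeSigA (PySem.List.pyGetD data i []) (PySem.List.pyGetD data (i + 1) [])) =
      (data.zip data.tail).map (fun ab => changeSigA ab.1 ab.2) := by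
  have hlen : data.length ≠ 0 := by simpa using hd
  apply List.ext_getElem
  · simp [PySem.List.length_pyRange_one]
  · intro k h1 h2
    have hk : k < data.length - 1 := by
      simp [PySem.List.length_pyRange_one] at h1
      omega
    have hb : k < (PySem.List.pyRange 0 ((data.length : Int) - 1) 1).length := by
      simpa using h1
    simp only [List.getElem_map, List.getElem_zip, List.getElem_tail]
    have hr : (PySem.List.pyRange 0 ((data.length : Int) - 1) 1)[k] = (k : Int) := by
      rw [PySem.List.getElem_pyRange_one 0 ((data.length : Int) - 1) k hb]
      ring
    rw [hr]
    have e1 : PySem.List.pyGetD data (k : Int) [] = data[k]'(by omega) := by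
      rw [PySem.List.pyGetD_natCast]
      exact List.getD_eq_getElem _ _ (by omega)
    have e2 : PySem.List.pyGetD data ((k : Int) + 1) [] = data[k + 1]'(by omega) := by
      have hc : ((k : Int) + 1) = ((k + 1 : Nat) : Int) := by push_cast; ring
      rw [hc, PySem.List.pyGetD_natCast]
      exact List.getD_eq_getElem _ _ (by omega)
    rw [e1, e2]

theorem foldA_body (data : List (List (String × String)))
    (init : Int × Int × Int × Int × Option String) (l : List Int) :
    l.foldl
      (fun (st : Int × Int × Int × Int × Option String) i =>
        let sig := changeSigA (PySem.List.pyGetD data i []) (PySem.List.pyGetD data (i + 1) [])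
        let gb : Int × Int := if 2 ≤ PySem.Str.len sig then (st.1 + 1, st.2.1) else (st.1, st.2.1 + 1)
        let th : Int := if PySem.Str.len sig = 3 then st.2.2.2.1 + 1 else st.2.2.2.1
        let rp : Int :=
          match st.2.2.2.2 with
          | some p => if sig = p then st.2.2.1 + 1 else st.2.2.1
          | none => st.2.2.1
        (gb.1, gb.2, rp, th, some sig)) init =
      (l.map (fun i => changeSigA (PySem.List.pyGetD data i []) (PySem.List.pyGetD data (i + 1) []))).foldl
        pvStep init := by
  rw [List.foldl_map]
  rfl

-- B's signature list is the same list
theorem sigsB_eq (data : List (List (String × String))) :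
    ((data.map whiteSquaresB).zip (PySem.List.slice (data.map whiteSquaresB) (some 1) none)).map
        (fun ab => changeSigB ab.1 ab.2) =
      (data.zip data.tail).map (fun ab => changeSigA ab.1 ab.2) := by
  rw [PySem.List.slice_from_one, ← List.map_tail, List.zip_map, List.map_map]
  apply List.map_congr_left
  intro ab _
  simp only [Function.comp, Prod.map]
  rw [ws_eq, ws_eq, sig_eq]

-- B's histogram sum over a filtered key set counts exactly the matching signatures
theorem hist_sum (p : String → Bool) (l : List String) :
    (((PySem.List.dedup l).filter p).map (fun k => (l.count k : Int))).sum = (l.countP p : Int) := by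
  have hperm : (PySem.List.dedup l).Perm l.dedup := by
    apply List.perm_of_nodup_nodup_toFinset_eq (PySem.List.nodup_dedup l) l.nodup_dedup
    ext x; simp
  have h2 : (((PySem.List.dedup l).filter p).map (fun k => l.count k)).sum
      = ((l.dedup.filter p).map (fun k => l.count k)).sum :=
    ((hperm.filter p).map _).sum_eq
  have h4 : (((PySem.List.dedup l).filter p).map (fun k => (l.count k : Int))).sum
      = ((((PySem.List.dedup l).filter p).map (fun k => l.count k)).sum : Int) := by
    rw [Nat.cast_list_sum, List.map_map]; rfl
  rw [h4, h2, List.sum_map_count_dedup_filter_eq_countP p l]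

-- B's freq loop is Counter(sigs); its filtered-items sum is a countP
theorem good_eq (l : List String) :
    (((l.foldl (fun (d : PySem.Dict String Int) s => d.insert s (d.getD s 0 + 1))
          PySem.Dict.empty).items.filter
        (fun kv => decide (2 ≤ PySem.Str.len kv.1))).map (·.2)).sum
      = (l.countP (fun s => decide (2 ≤ PySem.Str.len s)) : Int) := by
  rw [PySem.Dict.foldl_insert_getD_add_one_eq_counter, PySem.Dict.items_counter,
    List.filter_map, List.map_map]
  simpa using hist_sum (fun s => decide (2 ≤ PySem.Str.len s)) l

theorem three_eq (l : List String) :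
    (l.foldl (fun (d : PySem.Dict String Int) s => d.insert s (d.getD s 0 + 1))
        PySem.Dict.empty).getD "BKN" 0 = (l.count "BKN" : Int) := by
  rw [PySem.Dict.foldl_insert_getD_add_one_eq_counter, PySem.Dict.getD_counter]

-- complement identities for bad_under_two and repeat_sig
theorem bad_compl (l : List String) :
    l.countP (fun s => decide (2 ≤ PySem.Str.len s)) + l.countP (fun s => decide (PySem.Str.len s < 2))
      = l.length := by
  rw [List.length_eq_countP_add_countP (p := fun s => decide (2 ≤ PySem.Str.len s)) (l := l)]
  congr 1
  apply List.countP_congr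
  intro x _
  by_cases h2 : 2 ≤ PySem.Str.len x
  · rw [decide_eq_false (not_lt.mpr h2), decide_eq_true h2]; rfl
  · rw [decide_eq_true (lt_of_not_ge h2), decide_eq_false h2]; rfl

theorem runs_compl (l : List (String × String)) :
    l.countP (fun q => q.1 == q.2) + l.countP (fun q => q.1 != q.2) = l.length := by
  rw [List.length_eq_countP_add_countP (p := fun q : String × String => q.1 == q.2) (l := l)]
  congr 1
  apply List.countP_congr
  intro x _
  simp [bne]

-- ===== VERDICT (by name: the statement is the Claim_ definition above) =====
theorem transition_stats_spec : Claim_equal_transition_stats := by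
  intro data hDom hPre
  unfold Spec_transition_stats
  unfold transition_stats transition_stats_alt
  by_cases hle : (data.length : Int) ≤ 1
  · simp [hle]
  · have hd : data ≠ [] := by
      intro h; subst h; simp at hle
    simp only [hle, if_false]
    rw [foldA_body, map_range_eq data hd, pvLoop_none, sigsB_eq, PySem.List.slice_from_one]
    set sigs := (data.zip data.tail).map (fun ab => changeSigA ab.1 ab.2) with hsigs
    have hlen : sigs.length = data.length - 1 := by
      simp [hsigs, List.length_zip]
    have hslen : 2 ≤ data.length := by
      by_contra h
      exact hle (by omega)
    have hcnt3 : sigs.countP (fun s => decide (PySem.Str.len s = 3)) = sigs.count "BKN" := by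
      rw [List.count]
      apply List.countP_congr
      intro x hx
      rcases List.mem_map.mp hx with ⟨ab, _, rfl⟩
      rw [sig_len3_iff]
    have hbad : (sigs.countP (fun s => decide (PySem.Str.len s < 2)) : Int)
        = ((data.length : Int) - 1) - (sigs.countP (fun s => decide (2 ≤ PySem.Str.len s)) : Int) := by
      have := bad_compl sigs
      rw [hlen] at this
      omega
    have hzlen : (sigs.zip sigs.tail).length = data.length - 2 := by
      simp [List.length_zip, hlen]
      omega
    have hrep : ((sigs.zip sigs.tail).countP (fun q => q.1 == q.2) : Int)
        = ((data.length : Int) - 1)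
          - (1 + ((sigs.zip sigs.tail).countP (fun q => q.1 != q.2) : Int)) := by
      have := runs_compl (sigs.zip sigs.tail)
      rw [hzlen] at this
      omega
    rw [good_eq sigs, three_eq sigs, hcnt3, hbad, hrep]
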